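-- pv_equiv track=rewrite | github.com/optima740/my_project1 | MassVote.py | Mass_Max
-- ===== SOURCE A (Python) =====
-- def Mass_Max(Votes):
--     i=0
--     k=0
--     max = [0]*2
--     max[0] = Votes[i]
--     max[1] = i
--     flg = 0
--     for i in range(len(Votes)):
--         if Votes[i]>max[0]:
--             max[0] = Votes[i]
--             max[1] = i
--     i=0
--     for i in range(len(Votes)):
--         if Votes[i] == max[0]:
--             flg +=1
--     if flg > 1:
--         return None                     # несколько максисусов
--     else:
--         return max                      # один максимум
-- ===== SOURCE B (Python) =====
-- def Mass_Max(Votes):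
--     best = Votes[0]
--     bidx = 0
--     cnt = 1
--     for i in range(1, len(Votes)):
--         v = Votes[i]
--         if v > best:
--             best, bidx, cnt = v, i, 1
--         elif v == best:
--             cnt += 1
--     if cnt > 1:
--         return None
--     return [best, bidx]
-- ===== Notes on version B (the rewrite author's own statement) =====
-- stated objective: simpler
-- what changed: Replaces A's two full scans (one to find the max/first index, a second to count its occurrences) by a single pass that maintains best value, first index and an inline tie count that resets whenever a new max is found.
import Mathlib
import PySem

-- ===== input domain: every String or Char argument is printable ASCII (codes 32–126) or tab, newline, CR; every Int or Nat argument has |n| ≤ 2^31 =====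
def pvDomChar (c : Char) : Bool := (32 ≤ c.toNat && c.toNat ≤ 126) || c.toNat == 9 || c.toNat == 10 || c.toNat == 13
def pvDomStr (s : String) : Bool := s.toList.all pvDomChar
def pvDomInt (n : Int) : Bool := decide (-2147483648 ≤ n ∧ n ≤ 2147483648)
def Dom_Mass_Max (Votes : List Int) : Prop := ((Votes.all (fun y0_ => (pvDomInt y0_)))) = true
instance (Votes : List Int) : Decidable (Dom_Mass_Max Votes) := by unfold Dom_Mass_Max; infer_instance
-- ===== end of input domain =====

-- B fuses A's two scans (find max/first index, then count its occurrences) into one pass with an inline tie count; return-value equivalence on nonempty lists.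

-- ===== PORT A =====
-- literal transliteration: max[0]=Votes[0] (IndexError on [] → excluded by Pre_),
-- then two 'for i in range(len(Votes))' loops as foldl over pyRange with pyGetD.
def Mass_Max (Votes : List Int) : Option (List Int) :=
  match PySem.List.pyGet? Votes 0 with
  | none => none   -- Python raises IndexError here; outside Pre_
  | some v0 =>
    let m := (PySem.List.pyRange 0 (PySem.List.len Votes) 1).foldl
      (fun (m : Int × Int) i =>
        if PySem.List.pyGetD Votes i 0 > m.1 then (PySem.List.pyGetD Votes i 0, i) else m)
      (v0, 0)
    let flg := (PySem.List.pyRange 0 (PySem.List.len Votes) 1).foldl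
      (fun (f : Int) i => if PySem.List.pyGetD Votes i 0 == m.1 then f + 1 else f) 0
    if flg > 1 then none else some [m.1, m.2]

-- ===== PORT B =====
-- B's single loop over indices 1..len-1, transcribed as structural recursion over the tail
-- carrying (best, bidx, cnt) and the current index i.
def MMaltLoop : List Int → Int → Int → Int → Int → Int × Int × Int
  | [], best, bidx, cnt, _ => (best, bidx, cnt)
  | v :: rest, best, bidx, cnt, i =>
    if v > best then MMaltLoop rest v i 1 (i + 1)
    else if v == best then MMaltLoop rest best bidx (cnt + 1) (i + 1)
    else MMaltLoop rest best bidx cnt (i + 1)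

def Mass_Max_alt (Votes : List Int) : Option (List Int) :=
  match Votes with
  | [] => none   -- Python B raises IndexError here; outside Pre_
  | v0 :: rest =>
    let r := MMaltLoop rest v0 0 1 1
    if r.2.2 > 1 then none else some [r.1, r.2.1]

-- ===== PRECONDITION & SPEC =====
-- Pre_ excludes only the empty list, on which A (and B) raise IndexError.
def Pre_Mass_Max (Votes : List Int) : Prop := Votes ≠ []
instance (Votes : List Int) : Decidable (Pre_Mass_Max Votes) := by unfold Pre_Mass_Max; infer_instance
def pvWitness_Mass_Max : List Int := ([1, 2])

def Spec_Mass_Max (Votes : List Int) (out : Option (List Int)) : Prop := out = Mass_Max_alt Votes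
instance (Votes : List Int) (out : Option (List Int)) : Decidable (Spec_Mass_Max Votes out) := by unfold Spec_Mass_Max; infer_instance

-- ===== CLAIM (what is proved, stated in full; the proofs are below) =====
def Claim_equal_Mass_Max : Prop := ∀ (Votes : List Int), Dom_Mass_Max Votes → Pre_Mass_Max Votes → Spec_Mass_Max Votes (Mass_Max Votes)

-- ===== LEMMAS AND PROOFS =====

-- A's max-loop step, over enumerated (index, value) pairs
def MMstep (m : Int × Int) (p : Int × Int) : Int × Int :=
  if p.2 > m.1 then (p.2, p.1) else m

lemma MMstep_fst_ge (l : List (Int × Int)) (m : Int × Int) :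
    m.1 ≤ (l.foldl MMstep m).1 := by
  induction l generalizing m with
  | nil => exact le_refl _
  | cons p t ih =>
    simp only [List.foldl_cons, MMstep]
    split
    · exact le_trans (le_of_lt (by assumption)) (ih _)
    · exact ih _

-- the core correspondence: B's fused loop computes A's running max together with the
-- count of the final max in the processed segment
lemma MMaltLoop_eq (rest : List Int) (best bidx cnt i : Int) :
    MMaltLoop rest best bidx cnt i =
      (((PySem.List.enumerate rest i).foldl MMstep (best, bidx)).1,
       ((PySem.List.enumerate rest i).foldl MMstep (best, bidx)).2,
       (if ((PySem.List.enumerate rest i).foldl MMstep (best, bidx)).1 = best then cnt else 0)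
         + (rest.count ((PySem.List.enumerate rest i).foldl MMstep (best, bidx)).1 : Int)) := by
  induction rest generalizing best bidx cnt i with
  | nil =>
    simp [MMaltLoop, PySem.List.enumerate_nil]
  | cons v t ih =>
    rw [PySem.List.enumerate_cons]
    simp only [List.foldl_cons, MMaltLoop]
    by_cases hgt : v > best
    · have hstep : MMstep (best, bidx) (i, v) = (v, i) := by simp [MMstep, hgt]
      rw [if_pos (by exact_mod_cast hgt)]
      simp only [hstep]
      rw [ih v i 1 (i + 1)]
      have hge : v ≤ ((PySem.List.enumerate t (i + 1)).foldl MMstep (v, i)).1 :=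
        MMstep_fst_ge _ _
      have hne : ((PySem.List.enumerate t (i + 1)).foldl MMstep (v, i)).1 ≠ best := by
        intro h; omega
      rw [List.count_cons]
      by_cases hv : ((PySem.List.enumerate t (i + 1)).foldl MMstep (v, i)).1 = v
      · have hvb : v ≠ best := by omega
        simp [hv, hvb]
        omega
      · have : ¬ (v = ((PySem.List.enumerate t (i + 1)).foldl MMstep (v, i)).1) :=
          fun h => hv h.symm
        simp [hv, hne, this]
    · have hstep : MMstep (best, bidx) (i, v) = (best, bidx) := by simp [MMstep, hgt]
      rw [if_neg (by exact_mod_cast hgt)]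
      simp only [hstep]
      by_cases heq : v = best
      · rw [if_pos (by simpa using heq)]
        rw [ih best bidx (cnt + 1) (i + 1)]
        rw [List.count_cons]
        by_cases hv : ((PySem.List.enumerate t (i + 1)).foldl MMstep (best, bidx)).1 = best
        · simp [hv, heq]; ring
        · have hvne : ¬ (v = ((PySem.List.enumerate t (i + 1)).foldl MMstep (best, bidx)).1) := by
            intro h; apply hv; rw [← h, heq]
          simp [hv, hvne]
      · rw [if_neg (by simpa using heq)]
        rw [ih best bidx cnt (i + 1)]
        have hge : best ≤ ((PySem.List.enumerate t (i + 1)).foldl MMstep (best, bidx)).1 :=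
          MMstep_fst_ge _ _
        have hvne : ¬ (v = ((PySem.List.enumerate t (i + 1)).foldl MMstep (best, bidx)).1) := by
          intro h
          by_cases hb : ((PySem.List.enumerate t (i + 1)).foldl MMstep (best, bidx)).1 = best
          · exact heq (h.trans hb)
          · omega
        rw [List.count_cons]
        simp [hvne]

-- A's first loop over pyRange indices is the fold of MMstep over the enumerated list
lemma MMfoldA_eq_enumerate (Votes : List Int) (init : Int × Int) :
    (PySem.List.pyRange 0 (PySem.List.len Votes) 1).foldl
      (fun (m : Int × Int) i =>
        if PySem.List.pyGetD Votes i 0 > m.1 then (PySem.List.pyGetD Votes i 0, i) else m)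
      init
    = (PySem.List.enumerate Votes 0).foldl MMstep init := by
  simp only [PySem.List.len_eq]
  rw [PySem.List.enumerate_eq_map_pyRange Votes 0, List.foldl_map]
  rfl

-- ===== VERDICT (by name: the statement is the Claim_ definition above) =====
theorem Mass_Max_spec : Claim_equal_Mass_Max := by
  intro Votes _ hpre
  unfold Spec_Mass_Max
  match Votes with
  | [] => exact absurd rfl hpre
  | v0 :: rest =>
    unfold Mass_Max Mass_Max_alt
    rw [PySem.List.pyGet?_zero_cons]
    simp only
    rw [MMfoldA_eq_enumerate, PySem.List.enumerate_cons]
    simp only [List.foldl_cons]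
    have hstep0 : MMstep (v0, 0) (0, v0) = (v0, 0) := by simp [MMstep]
    simp only [hstep0]
    simp only [PySem.List.len_eq, zero_add]
    rw [PySem.List.foldl_pyRange_zero_pyGetD' (v0 :: rest) 0
      (fun (f : Int) v =>
        if v == (((PySem.List.enumerate rest 1).foldl MMstep (v0, 0)).1) then f + 1 else f) 0]
    rw [PySem.List.foldl_beq_add_one]
    rw [MMaltLoop_eq rest v0 0 1 1]
    set m := (PySem.List.enumerate rest 1).foldl MMstep (v0, 0) with hm
    rw [List.count_cons]
    by_cases hv : m.1 = v0
    · simp [hv]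
    · have : ¬ (v0 = m.1) := fun h => hv h.symm
      simp [hv, this]
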